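-- pv_equiv track=rewrite | github.com/bb-boy/repo2patent | scripts/02_repo_inventory.py | normalize_ext_rank
-- ===== SOURCE A (Python) =====
-- from collections import Counter
--
-- def normalize_ext_rank(ext_counter: Counter):
--     code_priority = {
--         ".java",
--         ".py",
--         ".js",
--         ".ts",
--         ".go",
--         ".rs",
--         ".cs",
--         ".cpp",
--         ".c",
--         ".h",
--         ".kt",
--         ".scala",
--     }
--     ordered = sorted(ext_counter.items(), key=lambda x: (-x[1], x[0]))
--     top = []
--     for ext, _ in ordered:
--         if not ext:
--             continue
--         if ext in code_priority:
--             top.append(ext)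
--     for ext, _ in ordered:
--         if ext and ext not in top:
--             top.append(ext)
--     return top[:10]
-- ===== SOURCE B (Python) =====
-- def normalize_ext_rank(ext_counter):
--     code_priority = {
--         ".java",
--         ".py",
--         ".js",
--         ".ts",
--         ".go",
--         ".rs",
--         ".cs",
--         ".cpp",
--         ".c",
--         ".h",
--         ".kt",
--         ".scala",
--     }
--     ranked = sorted(ext_counter.items(), key=lambda x: (-x[1], x[0]))
--     code = []
--     other = []
--     for ext, _ in ranked:
--         if not ext:
--             continue
--         (code if ext in code_priority else other).append(ext)
--     return (code + other)[:10]
-- ===== Notes on version B (the rewrite author's own statement) =====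
-- stated objective: faster
-- what changed: A's quadratic second scan with an 'ext not in top' list-membership test is replaced by a single pass over the sorted list that partitions extensions into a priority list and an other list (no membership test), concatenated and truncated to 10.
import Mathlib
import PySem

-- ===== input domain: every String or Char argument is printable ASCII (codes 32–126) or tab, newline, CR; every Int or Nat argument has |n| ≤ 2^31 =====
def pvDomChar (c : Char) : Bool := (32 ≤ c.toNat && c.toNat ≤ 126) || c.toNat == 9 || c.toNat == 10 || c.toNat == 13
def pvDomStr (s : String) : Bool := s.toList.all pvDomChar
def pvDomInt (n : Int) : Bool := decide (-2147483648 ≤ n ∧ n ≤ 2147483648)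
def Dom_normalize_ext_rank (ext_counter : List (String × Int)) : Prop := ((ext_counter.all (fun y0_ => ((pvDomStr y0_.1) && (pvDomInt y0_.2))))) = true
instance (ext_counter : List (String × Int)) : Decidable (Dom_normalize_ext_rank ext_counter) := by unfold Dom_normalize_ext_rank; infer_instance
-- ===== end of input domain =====

-- B replaces A's second scan (with its 'ext not in top' list-membership test) by a single
-- partitioning pass over the sorted list; equivalence is proved for all duplicate-key-free inputs.

-- ===== PORT A =====
-- the code_priority set literal (shared by both Python versions verbatim)
def codePriority : PySem.Set String :=
  PySem.Set.ofList [".java", ".py", ".js", ".ts", ".go", ".rs", ".cs", ".cpp", ".c", ".h", ".kt", ".scala"]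

def normalize_ext_rank (ext_counter : List (String × Int)) : List String :=
  -- ordered = sorted(ext_counter.items(), key=lambda x: (-x[1], x[0]))
  let ordered := PySem.List.sorted2 ext_counter (fun x => -x.2) (fun x => x.1)
  -- first loop: append priority extensions (skipping empty ones)
  let top := ordered.foldl
    (fun top kv =>
      if kv.1 = "" then top
      else if kv.1 ∈ codePriority then top ++ [kv.1]
      else top) []
  -- second loop: append the remaining non-empty extensions not already in top
  let top := ordered.foldl
    (fun top kv => if kv.1 ≠ "" ∧ kv.1 ∉ top then top ++ [kv.1] else top) top
  -- return top[:10]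
  PySem.List.slice top none (some 10)

-- ===== PORT B =====
def normalize_ext_rank_alt (ext_counter : List (String × Int)) : List String :=
  -- ranked = sorted(ext_counter.items(), key=lambda x: (-x[1], x[0]))
  let ranked := PySem.List.sorted2 ext_counter (fun x => -x.2) (fun x => x.1)
  -- one pass: partition non-empty extensions into (code, other)
  let p := ranked.foldl
    (fun (acc : List String × List String) kv =>
      if kv.1 = "" then acc
      else if kv.1 ∈ codePriority then (acc.1 ++ [kv.1], acc.2)
      else (acc.1, acc.2 ++ [kv.1])) ([], [])
  -- return (code + other)[:10]
  PySem.List.slice (p.1 ++ p.2) none (some 10)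

-- ===== PRECONDITION & SPEC =====
-- Pre_ requires pairwise-distinct extension keys: the Python argument is a Counter (a dict),
-- whose items() can never repeat a key, so an association list with duplicate keys does not
-- represent any input of the Python functions.
def Pre_normalize_ext_rank (ext_counter : List (String × Int)) : Prop :=
  (ext_counter.map Prod.fst).Nodup
instance (ext_counter : List (String × Int)) : Decidable (Pre_normalize_ext_rank ext_counter) := by
  unfold Pre_normalize_ext_rank; infer_instance

def pvWitness_normalize_ext_rank : (List (String × Int)) := [(".py", 3), (".txt", 5), ("", 2)]

def Spec_normalize_ext_rank (ext_counter : List (String × Int)) (out : List String) : Prop := out = normalize_ext_rank_alt ext_counter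
instance (ext_counter : List (String × Int)) (out : List String) : Decidable (Spec_normalize_ext_rank ext_counter out) := by unfold Spec_normalize_ext_rank; infer_instance

-- ===== CLAIM (what is proved, stated in full; the proofs are below) =====
def Claim_equal_normalize_ext_rank : Prop := ∀ (ext_counter : List (String × Int)), Dom_normalize_ext_rank ext_counter → Pre_normalize_ext_rank ext_counter → Spec_normalize_ext_rank ext_counter (normalize_ext_rank ext_counter)

-- ===== LEMMAS AND PROOFS =====

-- the two filter predicates the final form of both programs is phrased with
def pvIsPrio (kv : String × Int) : Bool := decide (kv.1 ≠ "") && decide (kv.1 ∈ codePriority)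
def pvIsOther (kv : String × Int) : Bool := decide (kv.1 ≠ "") && !decide (kv.1 ∈ codePriority)

-- A's first loop collects exactly the non-empty priority extensions, in order
theorem pvLoop1 (ys : List (String × Int)) (acc : List String) :
    ys.foldl (fun top kv =>
        if kv.1 = "" then top
        else if kv.1 ∈ codePriority then top ++ [kv.1]
        else top) acc
      = acc ++ (ys.filter pvIsPrio).map Prod.fst := by
  have h := PySem.List.foldl_append_if pvIsPrio Prod.fst ys acc
  rw [← h]
  apply PySem.List.foldl_congr_mem
  intro a kv _
  by_cases h1 : kv.1 = "" <;> by_cases h2 : kv.1 ∈ codePriority <;>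
    simp [pvIsPrio, h1, h2]

-- A's second loop appends exactly the non-empty non-priority extensions, provided the
-- accumulator already contains a key of ys iff that key is a non-empty priority one
theorem pvLoop2 (ys : List (String × Int)) (top : List String)
    (hnd : (ys.map Prod.fst).Nodup)
    (hinv : ∀ kv ∈ ys, kv.1 ∈ top ↔ (kv.1 ≠ "" ∧ kv.1 ∈ codePriority)) :
    ys.foldl (fun top kv => if kv.1 ≠ "" ∧ kv.1 ∉ top then top ++ [kv.1] else top) top
      = top ++ (ys.filter pvIsOther).map Prod.fst := by
  induction ys generalizing top with
  | nil => simp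
  | cons kv rest ih =>
    simp only [List.map_cons, List.nodup_cons] at hnd
    have hkv := hinv kv (by simp)
    by_cases hne : kv.1 ≠ ""
    · by_cases hp : kv.1 ∈ codePriority
      · -- priority: already in top, not appended, not in the filter
        have hin : kv.1 ∈ top := hkv.mpr ⟨hne, hp⟩
        have : ¬ (kv.1 ≠ "" ∧ kv.1 ∉ top) := by simp [hin]
        simp only [List.foldl_cons, if_neg this]
        rw [ih _ hnd.2 (fun kv' h' => hinv kv' (by simp [h']))]
        simp [pvIsOther, hne, hp]
      · -- non-priority: not yet in top, appended
        have hnin : kv.1 ∉ top := fun h => hp (hkv.mp h).2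
        have hc : kv.1 ≠ "" ∧ kv.1 ∉ top := ⟨hne, hnin⟩
        simp only [List.foldl_cons, if_pos hc]
        have hinv' : ∀ kv' ∈ rest, kv'.1 ∈ top ++ [kv.1] ↔ (kv'.1 ≠ "" ∧ kv'.1 ∈ codePriority) := by
          intro kv' h'
          have hne' : kv'.1 ≠ kv.1 := by
            intro h
            exact hnd.1 (h ▸ (List.mem_map.mpr ⟨kv', h', rfl⟩))
          simp only [List.mem_append, List.mem_singleton]
          rw [← hinv kv' (by simp [h'])]
          simp [hne']
        rw [ih _ hnd.2 hinv']
        simp [pvIsOther, hne, hp]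
    · -- empty extension: skipped, not in the filter
      simp only [ne_eq, not_not] at hne
      have : ¬ (kv.1 ≠ "" ∧ kv.1 ∉ top) := by simp [hne]
      simp only [List.foldl_cons, if_neg this]
      rw [ih _ hnd.2 (fun kv' h' => hinv kv' (by simp [h']))]
      simp [pvIsOther, hne]

-- B's single pass builds the two filtered projections at once
theorem pvLoopB (ys : List (String × Int)) (a b : List String) :
    ys.foldl (fun (acc : List String × List String) kv =>
        if kv.1 = "" then acc
        else if kv.1 ∈ codePriority then (acc.1 ++ [kv.1], acc.2)
        else (acc.1, acc.2 ++ [kv.1])) (a, b)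
      = (a ++ (ys.filter pvIsPrio).map Prod.fst, b ++ (ys.filter pvIsOther).map Prod.fst) := by
  induction ys generalizing a b with
  | nil => simp
  | cons kv rest ih =>
    by_cases h1 : kv.1 = "" <;> by_cases h2 : kv.1 ∈ codePriority <;>
      simp [h1, h2, ih, pvIsPrio, pvIsOther]

-- the result of A's first loop satisfies pvLoop2's invariant
theorem pvInv (ys : List (String × Int)) (kv : String × Int) (h : kv ∈ ys) :
    kv.1 ∈ (ys.filter pvIsPrio).map Prod.fst ↔ (kv.1 ≠ "" ∧ kv.1 ∈ codePriority) := by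
  constructor
  · intro hm
    rcases List.mem_map.mp hm with ⟨kv', hkv', hfst⟩
    rcases List.mem_filter.mp hkv' with ⟨_, hp⟩
    simp only [pvIsPrio, Bool.and_eq_true, decide_eq_true_eq] at hp
    exact hfst ▸ hp
  · intro ⟨hne, hp⟩
    exact List.mem_map.mpr ⟨kv, List.mem_filter.mpr ⟨h, by simp [pvIsPrio, hne, hp]⟩, rfl⟩

-- ===== VERDICT (by name: the statement is the Claim_ definition above) =====
theorem normalize_ext_rank_spec : Claim_equal_normalize_ext_rank := by
  intro l _ hpre
  unfold Spec_normalize_ext_rank normalize_ext_rank normalize_ext_rank_alt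
  simp only []
  set ys := PySem.List.sorted2 l (fun x => -x.2) (fun x => x.1) with hys
  have hnd : (ys.map Prod.fst).Nodup :=
    ((PySem.List.sorted2_perm l (fun x => -x.2) (fun x => x.1) false).map Prod.fst).nodup_iff.mpr hpre
  rw [pvLoop1, pvLoop2 ys _ hnd (fun kv h => by simpa using pvInv ys kv h), pvLoopB]
  simp
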